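-- pv_equiv track=rewrite | github.com/minghu6/leet-code | 1340_jump_games_5/py1340/mem_greedy.py | solve
-- ===== SOURCE A (Python) =====
-- from typing import List, Iterator
-- from functools import cache
--
-- def solve(arr: List[int], d: int) -> int:
--     n = len(arr)
--
--     forward = [-1] * n
--     backward = [-1] * n
--
--     def build(range: Iterator[int], storage: List[int]):
--         stack = []
--
--         for i in range:
--             while stack and arr[stack[-1]] < arr[i] and abs(stack[-1] - i) <= d:
--                 storage[stack.pop()] = i
--             stack.append(i)
--
--     build(range(n), forward)
--     build(range(n-1, -1, -1), backward)
--
--     @cache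
--     def backtrace(i: int) -> int:
--         if i == -1:
--             return 0
--
--         return max(backtrace(forward[i]), backtrace(backward[i])) + 1
--
--     return max(map(backtrace, range(n)))
-- ===== SOURCE B (Python) =====
-- from typing import List
-- from functools import cache
--
-- def solve(arr: List[int], d: int) -> int:
--     n = len(arr)
--
--     def first_greater(i, js):
--         for j in js:
--             if arr[j] > arr[i]:
--                 return j
--         return -1
--
--     forward = [first_greater(i, range(i + 1, min(i + d, n - 1) + 1)) for i in range(n)]
--     backward = [first_greater(i, range(i - 1, max(i - d, 0) - 1, -1)) for i in range(n)]
--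
--     @cache
--     def backtrace(i: int) -> int:
--         if i == -1:
--             return 0
--         return max(backtrace(forward[i]), backtrace(backward[i])) + 1
--
--     return max(map(backtrace, range(n)))
-- ===== Notes on version B (the rewrite author's own statement) =====
-- stated objective: simpler
-- what changed: the nearest-strictly-greater-within-distance-d pointer arrays (forward/backward) are computed by a direct per-index window scan with early break instead of A's monotonic-stack sweeps; the memoized backtrace and final max are unchanged
import Mathlib
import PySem

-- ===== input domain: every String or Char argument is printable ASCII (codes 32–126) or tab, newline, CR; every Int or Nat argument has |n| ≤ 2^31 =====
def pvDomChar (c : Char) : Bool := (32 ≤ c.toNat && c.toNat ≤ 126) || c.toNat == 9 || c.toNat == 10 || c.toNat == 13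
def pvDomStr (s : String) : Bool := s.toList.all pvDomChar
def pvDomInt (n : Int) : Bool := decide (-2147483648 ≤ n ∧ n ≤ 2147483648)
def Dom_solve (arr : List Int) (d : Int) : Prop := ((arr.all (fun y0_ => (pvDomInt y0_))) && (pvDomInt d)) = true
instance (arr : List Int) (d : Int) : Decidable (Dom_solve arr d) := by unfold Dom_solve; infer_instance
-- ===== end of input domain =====

-- B replaces A's monotonic-stack construction of the nearest-strictly-greater-within-d pointers
-- by a direct window scan per index (objective: simpler); the memoized backtrace and final max are unchanged.

-- ===== PORT A =====

-- the inner `while` of A's `build`: pops while arr[stack[-1]] < arr[i] and |stack[-1] - i| <= d,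
-- writing i into storage at each popped index; Lean list head = Python stack top.
def pvPop (arr : List Int) (d i : Int) : List Int → List Int → List Int × List Int
  | [], storage => ([], storage)
  | top :: rest, storage =>
    if PySem.List.pyGetD arr top 0 < PySem.List.pyGetD arr i 0 ∧ |top - i| ≤ d then
      pvPop arr d i rest (PySem.List.pySetD storage top i)
    else (top :: rest, storage)

-- A's `build`: fold the per-index pop-then-push step over the given index sequence.
def pvBuild (arr : List Int) (d : Int) (idxs : List Int) (storage : List Int) : List Int :=
  (idxs.foldl (fun st i =>
      let p := pvPop arr d i st.1 st.2
      (i :: p.1, p.2)) (([] : List Int), storage)).2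

-- A's @cache backtrace, ported as plain recursion with a fuel guard (fuel n+1 is enough:
-- arr values strictly increase along forward/backward pointers, so chains have at most n nodes).
def pvBacktrace (fw bw : List Int) : Nat → Int → Int
  | 0, _ => 0
  | fuel+1, i =>
    if i = -1 then 0
    else max (pvBacktrace fw bw fuel (PySem.List.pyGetD fw i (-1)))
             (pvBacktrace fw bw fuel (PySem.List.pyGetD bw i (-1))) + 1

def solve (arr : List Int) (d : Int) : Int :=
  let n : Int := arr.length
  let forward := pvBuild arr d (PySem.List.pyRange 0 n 1) (List.replicate arr.length (-1))
  let backward := pvBuild arr d (PySem.List.pyRange (n-1) (-1) (-1)) (List.replicate arr.length (-1))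
  -- max(...) of the empty sequence raises in Python; Pre_solve excludes arr = []
  (PySem.List.max? ((PySem.List.pyRange 0 n 1).map (pvBacktrace forward backward (arr.length + 1))) (fun x => x)).getD 0

-- ===== PORT B =====

-- B's first_greater: scan js left to right, return the first j with arr[j] > arr[i], else -1.
def pvFirstGreater (arr : List Int) (i : Int) (js : List Int) : Int :=
  match js with
  | [] => -1
  | j :: rest =>
    if PySem.List.pyGetD arr i 0 < PySem.List.pyGetD arr j 0 then j
    else pvFirstGreater arr i rest

def solve_alt (arr : List Int) (d : Int) : Int :=
  let n : Int := arr.length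
  let forward := (PySem.List.pyRange 0 n 1).map
    (fun i => pvFirstGreater arr i (PySem.List.pyRange (i+1) (min (i+d) (n-1) + 1) 1))
  let backward := (PySem.List.pyRange 0 n 1).map
    (fun i => pvFirstGreater arr i (PySem.List.pyRange (i-1) (max (i-d) 0 - 1) (-1)))
  (PySem.List.max? ((PySem.List.pyRange 0 n 1).map (pvBacktrace forward backward (arr.length + 1))) (fun x => x)).getD 0

-- ===== PRECONDITION & SPEC =====
-- Pre_solve excludes only the empty list, on which Python's max(...) raises ValueError in both A and B.
def Pre_solve (arr : List Int) (d : Int) : Prop := arr ≠ []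
instance (arr : List Int) (d : Int) : Decidable (Pre_solve arr d) := by unfold Pre_solve; infer_instance
def pvWitness_solve : List Int × Int := ([1, 3, 2], 1)

def Spec_solve (arr : List Int) (d : Int) (out : Int) : Prop := out = solve_alt arr d
instance (arr : List Int) (d : Int) (out : Int) : Decidable (Spec_solve arr d out) := by unfold Spec_solve; infer_instance

-- ===== CLAIM (what is proved, stated in full; the proofs are below) =====
def Claim_equal_solve : Prop := ∀ (arr : List Int) (d : Int), Dom_solve arr d → Pre_solve arr d → Spec_solve arr d (solve arr d)

-- ===== LEMMAS AND PROOFS =====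

-- The value at a (Nat-cast) index.
def pvV (arr : List Int) (k : Int) : Int := PySem.List.pyGetD arr k 0

-- first j in (k, i) (scanning upward) with arr[j] > arr[k] and j - k ≤ d, else -1
def pvFgF (arr : List Int) (d i k : Int) : Int :=
  ((PySem.List.pyRange (k+1) i 1).find? (fun j => decide (pvV arr k < pvV arr j ∧ j - k ≤ d))).getD (-1)

-- first j in (i, k) (scanning downward) with arr[j] > arr[k] and k - j ≤ d, else -1
def pvFgB (arr : List Int) (d i k : Int) : Int :=
  ((PySem.List.pyRange (k-1) i (-1)).find? (fun j => decide (pvV arr k < pvV arr j ∧ k - j ≤ d))).getD (-1)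

-- pop condition of A's inner while at step i
def pvPc (arr : List Int) (d i k : Int) : Bool := decide (pvV arr k < pvV arr i ∧ |k - i| ≤ d)

-- stack membership predicate: k survives up to boundary i iff it found no greater-within-d yet
def pvQF (arr : List Int) (d i k : Int) : Bool := decide (pvFgF arr d i k = -1)

def pvStkF (arr : List Int) (d i : Int) : List Int :=
  ((PySem.List.pyRange 0 i 1).filter (pvQF arr d i)).reverse

def pvStoF (arr : List Int) (d : Int) (n i : Int) : List Int :=
  (PySem.List.pyRange 0 n 1).map (pvFgF arr d i)

theorem pvPop_eq (arr : List Int) (d i : Int) :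
    ∀ (L S : List Int), pvPop arr d i L S =
      (L.dropWhile (pvPc arr d i),
       (L.takeWhile (pvPc arr d i)).foldl (fun s k => PySem.List.pySetD s k i) S) := by
  intro L
  induction L with
  | nil => intro S; simp [pvPop]
  | cons top rest ih =>
    intro S
    by_cases h : pvV arr top < pvV arr i ∧ |top - i| ≤ d
    · simp [pvPop, pvV] at h ⊢
      rw [if_pos h]
      simp [ih, List.dropWhile_cons, List.takeWhile_cons, pvPc, pvV, h]
    · rw [pvPop, if_neg (by simpa [pvV] using h)]
      have hpc : pvPc arr d i top = false := by
        simp only [pvPc, decide_eq_false_iff_not]; simpa [pvV] using h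
      simp [List.dropWhile_cons, List.takeWhile_cons, hpc]

theorem pv_dropWhile_eq_filter {α : Type} (p : α → Bool) :
    ∀ (L : List α), L.Pairwise (fun a b => p b = true → p a = true) →
      L.dropWhile p = L.filter (fun x => !p x) := by
  intro L
  induction L with
  | nil => simp
  | cons x t ih =>
    intro hp
    rcases List.pairwise_cons.mp hp with ⟨hx, ht⟩
    by_cases h : p x
    · simp [List.dropWhile_cons, h, ih ht]
    · have hall : ∀ y ∈ t, ¬ p y = true := fun y hy hpy => h (hx y hy hpy)
      have : List.filter (fun x => !p x) t = t :=
        List.filter_eq_self.mpr (by intro a ha; simp [hall a ha])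
      simp [List.dropWhile_cons, List.filter_cons, h, this]

theorem pv_takeWhile_eq_filter {α : Type} (p : α → Bool) :
    ∀ (L : List α), L.Pairwise (fun a b => p b = true → p a = true) →
      L.takeWhile p = L.filter p := by
  intro L
  induction L with
  | nil => simp
  | cons x t ih =>
    intro hp
    rcases List.pairwise_cons.mp hp with ⟨hx, ht⟩
    by_cases h : p x
    · simp [List.takeWhile_cons, h, ih ht]
    · have hall : ∀ y ∈ t, ¬ p y = true := fun y hy hpy => h (hx y hy hpy)
      have : List.filter p t = [] := List.filter_eq_nil_iff.mpr hall
      simp [List.takeWhile_cons, List.filter_cons, h, this]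

theorem pvFgF_eq_neg_one_iff (arr : List Int) (d i k : Int) (hk : 0 ≤ k) :
    pvFgF arr d i k = -1 ↔ ∀ j, k < j → j < i → ¬(pvV arr k < pvV arr j ∧ j - k ≤ d) := by
  unfold pvFgF
  rcases h : (PySem.List.pyRange (k+1) i 1).find? (fun j => decide (pvV arr k < pvV arr j ∧ j - k ≤ d)) with _ | j
  · rw [List.find?_eq_none] at h
    simp only [Option.getD_none]
    constructor
    · intro _ j hj1 hj2
      have := h j (by rw [PySem.List.mem_pyRange_one]; omega)
      simpa using this
    · intro _; trivial
  · have hmem := List.mem_of_find?_eq_some h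
    rw [PySem.List.mem_pyRange_one] at hmem
    have hsome := List.find?_some h
    simp only [decide_eq_true_eq] at hsome
    simp only [Option.getD_some]
    constructor
    · intro hj; omega
    · intro hall; exact absurd hsome (hall j (by omega) (by omega))

theorem pvFgF_ge (arr : List Int) (d i k : Int) (h : i ≤ k + 1) :
    pvFgF arr d i k = -1 := by
  unfold pvFgF
  rw [PySem.List.pyRange_one_eq_nil (by omega)]
  rfl

-- step update of the forward spec pointer
theorem pvFgF_succ (arr : List Int) (d k m : Int) (h0 : 0 ≤ k) (hkm : k < m) :
    pvFgF arr d (m+1) k =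
      if pvFgF arr d m k = -1 then
        (if pvV arr k < pvV arr m ∧ m - k ≤ d then m else -1)
      else pvFgF arr d m k := by
  unfold pvFgF
  rw [PySem.List.pyRange_one_succ_right (by omega : k + 1 ≤ m), List.find?_append]
  rcases h : (PySem.List.pyRange (k+1) m 1).find? (fun j => decide (pvV arr k < pvV arr j ∧ j - k ≤ d)) with _ | j
  · simp only [Option.none_or, Option.getD_none, if_pos rfl]
    cases hdec : decide (pvV arr k < pvV arr m ∧ m - k ≤ d) with
    | true =>
      have hp := of_decide_eq_true hdec
      simp only [List.find?_cons, hdec, Option.getD_some, if_pos hp]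
      simp
    | false =>
      have hp := of_decide_eq_false hdec
      simp only [List.find?_cons, hdec, List.find?_nil, Option.getD_none, if_neg hp]
      simp
  · have hmem := List.mem_of_find?_eq_some h
    rw [PySem.List.mem_pyRange_one] at hmem
    simp only [Option.some_or, Option.getD_some]
    rw [if_neg (by omega)]

-- setting one in-range index of a mapped range
theorem pv_set_map_range (f : Int → Int) (n : Nat) (k0 : Int) (hn0 : 0 ≤ k0) (hn1 : k0 < (n:Int)) (v : Int) :
    ((PySem.List.pyRange 0 (n:Int) 1).map f).set k0.toNat v =
    (PySem.List.pyRange 0 (n:Int) 1).map (fun k => if k = k0 then v else f k) := by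
  apply List.ext_getElem
  · simp
  · intro t h1 h2
    have hlen : t < (PySem.List.pyRange 0 (n:Int) 1).length := by
      simpa using h2
    rw [List.getElem_set]
    simp only [List.getElem_map, PySem.List.getElem_pyRange_one _ _ _ hlen]
    have : (k0.toNat = t) ↔ ((0:Int) + (t:Int) = k0) := by omega
    by_cases hc : k0.toNat = t
    · rw [if_pos hc, if_pos (this.mp hc)]
    · rw [if_neg hc, if_neg (fun hh => hc (this.mpr hh))]

theorem pv_fold_set_map (arr : List Int) (n : Nat) (m : Int) :
    ∀ (K : List Int) (f : Int → Int), (∀ k ∈ K, 0 ≤ k ∧ k < (n:Int)) →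
      K.foldl (fun s k => PySem.List.pySetD s k m) ((PySem.List.pyRange 0 (n:Int) 1).map f) =
      (PySem.List.pyRange 0 (n:Int) 1).map (fun k => if k ∈ K then m else f k) := by
  intro K
  induction K with
  | nil => intro f _; simp
  | cons k0 K' ih =>
    intro f hK
    have hk0 := hK k0 (List.mem_cons_self ..)
    have step : PySem.List.pySetD ((PySem.List.pyRange 0 (n:Int) 1).map f) k0 m =
        (PySem.List.pyRange 0 (n:Int) 1).map (fun k => if k = k0 then m else f k) := by
      rw [PySem.List.pySetD_of_nonneg _ _ hk0.1, pv_set_map_range f n k0 hk0.1 hk0.2 m]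
    rw [List.foldl_cons, step, ih _ (fun k hk => hK k (List.mem_cons_of_mem _ hk))]
    apply List.map_congr_left
    intro a _
    by_cases h1 : a ∈ K'
    · simp [h1]
    · by_cases h2 : a = k0 <;> simp [h1, h2]

theorem pvStkF_mem (arr : List Int) (d i k : Int) :
    k ∈ pvStkF arr d i ↔ (0 ≤ k ∧ k < i ∧ pvFgF arr d i k = -1) := by
  simp only [pvStkF, List.mem_reverse, List.mem_filter, PySem.List.mem_pyRange_one, pvQF,
    decide_eq_true_eq]
  tauto

theorem pvStkF_pairwise (arr : List Int) (d : Int) (m : Int) :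
    (pvStkF arr d m).Pairwise (fun a b => pvPc arr d m b = true → pvPc arr d m a = true) := by
  have hgt : (pvStkF arr d m).Pairwise (fun a b => b < a) := by
    rw [pvStkF, List.pairwise_reverse]
    exact (PySem.List.pairwise_lt_pyRange_one 0 m).filter _
  refine hgt.imp_of_mem ?_
  intro a b ha hb hba hpcb
  rcases (pvStkF_mem arr d m a).mp ha with ⟨ha0, ham, hafg⟩
  rcases (pvStkF_mem arr d m b).mp hb with ⟨hb0, hbm, hbfg⟩
  rw [pvPc, decide_eq_true_eq] at hpcb ⊢
  rcases hpcb with ⟨hvb, habsb⟩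
  have habsb' : m - b ≤ d := by
    rw [abs_sub_comm, abs_of_nonneg (by omega)] at habsb; exact habsb
  constructor
  · by_contra hva
    push_neg at hva
    exact (pvFgF_eq_neg_one_iff arr d m b hb0).mp hbfg a hba ham
      ⟨lt_of_lt_of_le hvb hva, by omega⟩
  · rw [abs_sub_comm, abs_of_nonneg (by omega)]; omega

-- relating the Bool pop condition to the Prop used by pvFgF_succ, below the boundary
theorem pvPc_eq (arr : List Int) (d m k : Int) (hkm : k < m) :
    pvPc arr d m k = decide (pvV arr k < pvV arr m ∧ m - k ≤ d) := by
  have : |k - m| = m - k := by rw [abs_sub_comm]; exact abs_of_nonneg (by omega)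
  simp [pvPc, this]

theorem pv_buildF_inv (arr : List Int) (d : Int) :
    ∀ (m : Nat), (m:Int) ≤ (arr.length:Int) →
      (PySem.List.pyRange 0 (m:Int) 1).foldl
        (fun st i => let p := pvPop arr d i st.1 st.2; (i :: p.1, p.2))
        ([], List.replicate arr.length (-1)) =
      (pvStkF arr d (m:Int), pvStoF arr d (arr.length:Int) (m:Int)) := by
  intro m
  induction m with
  | zero =>
    intro _
    rw [show ((0:Nat):Int) = 0 from rfl, PySem.List.pyRange_one_eq_nil (by omega)]
    simp only [List.foldl_nil]
    rw [Prod.mk.injEq]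
    constructor
    · rw [pvStkF, PySem.List.pyRange_one_eq_nil (by omega)]
      simp
    · rw [pvStoF]
      have : ∀ k ∈ PySem.List.pyRange 0 (arr.length:Int) 1, pvFgF arr d 0 k = (-1 : Int) := by
        intro k hk
        rw [PySem.List.mem_pyRange_one] at hk
        exact pvFgF_ge arr d 0 k (by omega)
      rw [List.map_congr_left this, List.map_const', PySem.List.length_pyRange_one]
      congr 1
  | succ m ih =>
    intro hm
    have hmn : (m:Int) < (arr.length:Int) := by push_cast at hm ⊢; omega
    have hcast : ((m+1 : Nat):Int) = (m:Int) + 1 := by push_cast; ring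
    rw [hcast, PySem.List.pyRange_one_succ_right (by omega), List.foldl_append,
      ih (by omega), List.foldl_cons, List.foldl_nil]
    simp only [pvPop_eq]
    have hpw := pvStkF_pairwise arr d (m:Int)
    rw [pv_dropWhile_eq_filter _ _ hpw, pv_takeWhile_eq_filter _ _ hpw, Prod.mk.injEq]
    constructor
    · -- stack component
      have hqm : pvQF arr d ((m:Int)+1) (m:Int) = true := by
        simp [pvQF, pvFgF_ge arr d ((m:Int)+1) (m:Int) (by omega)]
      have hstk : pvStkF arr d ((m:Int)+1) =
          (m:Int) :: (List.filter (pvQF arr d ((m:Int)+1)) (PySem.List.pyRange 0 (m:Int) 1)).reverse := by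
        rw [pvStkF, PySem.List.pyRange_one_succ_right (by omega : (0:Int) ≤ (m:Int)),
          List.filter_append, List.reverse_append]
        simp [List.filter_cons, hqm]
      rw [hstk, pvStkF]
      congr 1
      rw [List.filter_reverse, List.filter_filter]
      congr 1
      apply List.filter_congr
      intro k hk
      rw [PySem.List.mem_pyRange_one] at hk
      have hsucc := pvFgF_succ arr d k (m:Int) (by omega) (by omega)
      by_cases h1 : pvFgF arr d (m:Int) k = -1
      · rw [if_pos h1] at hsucc
        by_cases h2 : pvV arr k < pvV arr (m:Int) ∧ (m:Int) - k ≤ d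
        · rw [if_pos h2] at hsucc
          simp [pvQF, hsucc, pvPc_eq arr d (m:Int) k (by omega), h2, h1]
        · rw [if_neg h2] at hsucc
          simp [pvQF, hsucc, pvPc_eq arr d (m:Int) k (by omega), h2, h1]
          push_neg at h2
          rcases lt_or_ge (pvV arr k) (pvV arr (m:Int)) with hv | hv
          · exact Or.inr (by have := h2 hv; omega)
          · exact Or.inl hv
      · rw [if_neg h1] at hsucc
        simp [pvQF, hsucc, h1]
    · -- storage component
      rw [pvStoF, pv_fold_set_map arr arr.length (m:Int) _ (pvFgF arr d (m:Int))
        (by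
          intro k hk
          rcases List.mem_filter.mp hk with ⟨hks, _⟩
          rcases (pvStkF_mem arr d (m:Int) k).mp hks with ⟨h0, h1, _⟩
          exact ⟨h0, by omega⟩)]
      rw [pvStoF]
      apply List.map_congr_left
      intro k hk
      rw [PySem.List.mem_pyRange_one] at hk
      by_cases hK : k ∈ List.filter (pvPc arr d (m:Int)) (pvStkF arr d (m:Int))
      · rcases List.mem_filter.mp hK with ⟨hks, hpc⟩
        rcases (pvStkF_mem arr d (m:Int) k).mp hks with ⟨h0, h1, hfg⟩
        rw [if_pos hK]
        rw [pvPc_eq arr d (m:Int) k h1, decide_eq_true_eq] at hpc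
        rw [pvFgF_succ arr d k (m:Int) h0 h1, if_pos hfg, if_pos hpc]
      · rw [if_neg hK]
        by_cases hkm : k < (m:Int)
        · have hsucc := pvFgF_succ arr d k (m:Int) (by omega) hkm
          by_cases h1 : pvFgF arr d (m:Int) k = -1
          · have hnpc : ¬ (pvV arr k < pvV arr (m:Int) ∧ (m:Int) - k ≤ d) := by
              intro hc
              exact hK (List.mem_filter.mpr ⟨(pvStkF_mem arr d (m:Int) k).mpr ⟨by omega, hkm, h1⟩,
                by rw [pvPc_eq arr d (m:Int) k hkm]; exact decide_eq_true hc⟩)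
            rw [if_pos h1, if_neg hnpc] at hsucc
            rw [hsucc, h1]
          · rw [if_neg h1] at hsucc
            exact hsucc.symm
        · rw [pvFgF_ge arr d ((m:Int)+1) k (by omega), pvFgF_ge arr d (m:Int) k (by omega)]

theorem pv_find?_congr {α : Type} (p q : α → Bool) :
    ∀ (l : List α), (∀ x ∈ l, p x = q x) → l.find? p = l.find? q := by
  intro l
  induction l with
  | nil => intro _; rfl
  | cons x t ih =>
    intro h
    have hx := h x (List.mem_cons_self ..)
    rw [List.find?_cons, List.find?_cons, hx, ih (fun y hy => h y (List.mem_cons_of_mem _ hy))]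

theorem pvFirstGreater_eq_find? (arr : List Int) (i : Int) :
    ∀ (js : List Int), pvFirstGreater arr i js =
      (js.find? (fun j => decide (pvV arr i < pvV arr j))).getD (-1) := by
  intro js
  induction js with
  | nil => rfl
  | cons j rest ih =>
    rw [pvFirstGreater, List.find?_cons]
    cases hdec : decide (pvV arr i < pvV arr j) with
    | true =>
      rw [if_pos (by simpa [pvV] using of_decide_eq_true hdec)]
      rfl
    | false =>
      rw [if_neg (by simpa [pvV] using of_decide_eq_false hdec)]
      exact ih

theorem pv_scanF (arr : List Int) (d k : Int) (h0 : 0 ≤ k) (hk : k < (arr.length:Int)) :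
    pvFgF arr d (arr.length:Int) k =
      pvFirstGreater arr k (PySem.List.pyRange (k+1) (min (k+d) ((arr.length:Int)-1) + 1) 1) := by
  set n := (arr.length:Int) with hn
  set e := min (k+d) (n-1) + 1 with he
  rw [pvFirstGreater_eq_find?]
  by_cases hcase : e ≤ k + 1
  · rw [PySem.List.pyRange_one_eq_nil hcase]
    simp only [List.find?_nil, Option.getD_none]
    rw [pvFgF_eq_neg_one_iff arr d n k h0]
    intro j hj1 hj2 hc
    omega
  · have he1 : k + 1 ≤ e := by omega
    have he2 : e ≤ n := by omega
    rw [pvFgF, PySem.List.pyRange_one_append (k+1) e n he1 he2, List.find?_append]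
    have hsecond : (PySem.List.pyRange e n 1).find?
        (fun j => decide (pvV arr k < pvV arr j ∧ j - k ≤ d)) = none := by
      rw [List.find?_eq_none]
      intro j hj
      rw [PySem.List.mem_pyRange_one] at hj
      simp only [decide_eq_true_eq, not_and]
      intro _
      omega
    rw [hsecond, Option.or_none]
    have hfirst := pv_find?_congr (fun j => decide (pvV arr k < pvV arr j ∧ j - k ≤ d))
      (fun j => decide (pvV arr k < pvV arr j)) (PySem.List.pyRange (k+1) e 1) (by
        intro j hj
        rw [PySem.List.mem_pyRange_one] at hj
        have hd : j - k ≤ d := by omega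
        simp [hd])
    rw [hfirst]

theorem pv_forward_eq (arr : List Int) (d : Int) :
    pvBuild arr d (PySem.List.pyRange 0 arr.length 1) (List.replicate arr.length (-1)) =
      (PySem.List.pyRange 0 (arr.length : Int) 1).map
        (fun i => pvFirstGreater arr i (PySem.List.pyRange (i+1) (min (i+d) ((arr.length : Int)-1) + 1) 1)) := by
  rw [pvBuild, show (PySem.List.pyRange 0 (arr.length:Int) 1) =
      (PySem.List.pyRange 0 ((arr.length:Nat):Int) 1) from rfl,
    pv_buildF_inv arr d arr.length (le_refl _)]
  apply List.map_congr_left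
  intro k hk
  rw [PySem.List.mem_pyRange_one] at hk
  exact pv_scanF arr d k (by omega) (by omega)

theorem pv_pyRange_neg_one_succ_right (a b : Int) (h : b ≤ a) :
    PySem.List.pyRange a (b-1) (-1) = PySem.List.pyRange a b (-1) ++ [b] := by
  rw [PySem.List.pyRange_neg_one_eq_reverse, PySem.List.pyRange_neg_one_eq_reverse,
    show b - 1 + 1 = b by ring, PySem.List.pyRange_one_cons (by omega : b < a + 1),
    List.reverse_cons]

theorem pv_pyRange_neg_one_append (a m b : Int) (h1 : b ≤ m) (h2 : m ≤ a) :
    PySem.List.pyRange a b (-1) =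
      PySem.List.pyRange a m (-1) ++ PySem.List.pyRange m b (-1) := by
  rw [PySem.List.pyRange_neg_one_eq_reverse, PySem.List.pyRange_neg_one_eq_reverse,
    PySem.List.pyRange_neg_one_eq_reverse,
    PySem.List.pyRange_one_append (b+1) (m+1) (a+1) (by omega) (by omega),
    List.reverse_append]

def pvQB (arr : List Int) (d i k : Int) : Bool := decide (pvFgB arr d i k = -1)

def pvStkB (arr : List Int) (d i : Int) : List Int :=
  (PySem.List.pyRange (i+1) (arr.length:Int) 1).filter (pvQB arr d i)

def pvStoB (arr : List Int) (d i : Int) : List Int :=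
  (PySem.List.pyRange 0 (arr.length:Int) 1).map (pvFgB arr d i)

theorem pvFgB_eq_neg_one_iff (arr : List Int) (d i k : Int) (hi : -1 ≤ i) :
    pvFgB arr d i k = -1 ↔ ∀ j, i < j → j < k → ¬(pvV arr k < pvV arr j ∧ k - j ≤ d) := by
  unfold pvFgB
  rcases h : (PySem.List.pyRange (k-1) i (-1)).find? (fun j => decide (pvV arr k < pvV arr j ∧ k - j ≤ d)) with _ | j
  · rw [List.find?_eq_none] at h
    simp only [Option.getD_none]
    constructor
    · intro _ j hj1 hj2
      have := h j (by rw [PySem.List.mem_pyRange_neg_one]; omega)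
      simpa using this
    · intro _; trivial
  · have hmem := List.mem_of_find?_eq_some h
    rw [PySem.List.mem_pyRange_neg_one] at hmem
    have hsome := List.find?_some h
    simp only [decide_eq_true_eq] at hsome
    simp only [Option.getD_some]
    constructor
    · intro hj; omega
    · intro hall; exact absurd hsome (hall j (by omega) (by omega))

theorem pvFgB_le (arr : List Int) (d i k : Int) (h : k - 1 ≤ i) :
    pvFgB arr d i k = -1 := by
  unfold pvFgB
  rw [PySem.List.pyRange_neg_one_eq_nil h]
  rfl

theorem pvFgB_pred (arr : List Int) (d k m : Int) (hkm : m < k) (hm1 : -1 ≤ m) :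
    pvFgB arr d (m-1) k =
      if pvFgB arr d m k = -1 then
        (if pvV arr k < pvV arr m ∧ k - m ≤ d then m else -1)
      else pvFgB arr d m k := by
  unfold pvFgB
  rw [pv_pyRange_neg_one_succ_right (k-1) m (by omega), List.find?_append]
  rcases h : (PySem.List.pyRange (k-1) m (-1)).find? (fun j => decide (pvV arr k < pvV arr j ∧ k - j ≤ d)) with _ | j
  · simp only [Option.none_or, Option.getD_none, if_pos rfl]
    cases hdec : decide (pvV arr k < pvV arr m ∧ k - m ≤ d) with
    | true =>
      have hp := of_decide_eq_true hdec
      simp only [List.find?_cons, hdec, Option.getD_some, if_pos hp]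
      simp
    | false =>
      have hp := of_decide_eq_false hdec
      simp only [List.find?_cons, hdec, List.find?_nil, Option.getD_none, if_neg hp]
      simp
  · have hmem := List.mem_of_find?_eq_some h
    rw [PySem.List.mem_pyRange_neg_one] at hmem
    simp only [Option.some_or, Option.getD_some]
    rw [if_neg (by omega)]

theorem pvPcB_eq (arr : List Int) (d m k : Int) (hkm : m < k) :
    pvPc arr d m k = decide (pvV arr k < pvV arr m ∧ k - m ≤ d) := by
  have : |k - m| = k - m := abs_of_nonneg (by omega)
  simp [pvPc, this]

theorem pvStkB_mem (arr : List Int) (d i k : Int) :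
    k ∈ pvStkB arr d i ↔ (i < k ∧ k < (arr.length:Int) ∧ pvFgB arr d i k = -1) := by
  simp only [pvStkB, List.mem_filter, PySem.List.mem_pyRange_one, pvQB, decide_eq_true_eq]
  constructor
  · rintro ⟨⟨ha, hb⟩, hc⟩; exact ⟨by omega, hb, hc⟩
  · rintro ⟨ha, hb, hc⟩; exact ⟨⟨by omega, hb⟩, hc⟩

theorem pvStkB_pairwise (arr : List Int) (d : Int) (m : Int) (hm : -1 ≤ m) :
    (pvStkB arr d m).Pairwise (fun a b => pvPc arr d m b = true → pvPc arr d m a = true) := by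
  have hlt : (pvStkB arr d m).Pairwise (fun a b => a < b) := by
    exact (PySem.List.pairwise_lt_pyRange_one (m+1) (arr.length:Int)).filter _
  refine hlt.imp_of_mem ?_
  intro a b ha hb hab hpcb
  rcases (pvStkB_mem arr d m a).mp ha with ⟨ham, han, hafg⟩
  rcases (pvStkB_mem arr d m b).mp hb with ⟨hbm, hbn, hbfg⟩
  rw [pvPc, decide_eq_true_eq] at hpcb ⊢
  rcases hpcb with ⟨hvb, habsb⟩
  have habsb' : b - m ≤ d := by
    rw [abs_of_nonneg (by omega)] at habsb; exact habsb
  constructor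
  · by_contra hva
    push_neg at hva
    exact (pvFgB_eq_neg_one_iff arr d m b hm).mp hbfg a (by omega) hab
      ⟨lt_of_lt_of_le hvb hva, by omega⟩
  · rw [abs_of_nonneg (by omega)]; omega

theorem pv_buildB_inv (arr : List Int) (d : Int) :
    ∀ (t : Nat), (t:Int) ≤ (arr.length:Int) →
      (PySem.List.pyRange ((arr.length:Int)-1) ((arr.length:Int)-1-(t:Int)) (-1)).foldl
        (fun st i => let p := pvPop arr d i st.1 st.2; (i :: p.1, p.2))
        ([], List.replicate arr.length (-1)) =
      (pvStkB arr d ((arr.length:Int)-1-(t:Int)), pvStoB arr d ((arr.length:Int)-1-(t:Int))) := by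
  set n := (arr.length:Int) with hn
  intro t
  induction t with
  | zero =>
    intro _
    rw [show ((0:Nat):Int) = 0 from rfl, show n - 1 - 0 = n - 1 by ring,
      PySem.List.pyRange_neg_one_eq_nil (by omega)]
    simp only [List.foldl_nil]
    rw [Prod.mk.injEq]
    constructor
    · rw [pvStkB, show n - 1 + 1 = n by ring, ← hn, PySem.List.pyRange_one_eq_nil (by omega)]
      simp
    · rw [pvStoB]
      have : ∀ k ∈ PySem.List.pyRange 0 n 1, pvFgB arr d (n-1) k = (-1 : Int) := by
        intro k hk
        rw [PySem.List.mem_pyRange_one] at hk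
        exact pvFgB_le arr d (n-1) k (by omega)
      rw [← hn, List.map_congr_left this, List.map_const', PySem.List.length_pyRange_one]
      congr 1
  | succ t ih =>
    intro ht
    have htn : (t:Int) < n := by push_cast at ht ⊢; omega
    set m := n - 1 - (t:Int) with hm
    have hm0 : 0 ≤ m := by omega
    have hmn : m < n := by omega
    have hcast : n - 1 - ((t+1 : Nat):Int) = m - 1 := by push_cast; omega
    rw [hcast, pv_pyRange_neg_one_succ_right (n-1) m (by omega), List.foldl_append,
      ih (by omega), List.foldl_cons, List.foldl_nil]
    simp only [pvPop_eq]
    have hpw := pvStkB_pairwise arr d m (by omega)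
    rw [pv_dropWhile_eq_filter _ _ hpw, pv_takeWhile_eq_filter _ _ hpw, Prod.mk.injEq]
    constructor
    · -- stack component
      have hqm : pvQB arr d (m-1) m = true := by
        simp [pvQB, pvFgB_le arr d (m-1) m (by omega)]
      have hstk : pvStkB arr d (m-1) =
          m :: (PySem.List.pyRange (m+1) n 1).filter (pvQB arr d (m-1)) := by
        rw [pvStkB, show m - 1 + 1 = m by ring, ← hn,
          PySem.List.pyRange_one_cons (by omega : m < n), List.filter_cons, hqm]
        simp
      rw [hstk, pvStkB, ← hn]
      congr 1
      rw [List.filter_filter]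
      apply (List.filter_congr ?_).symm
      intro k hk
      rw [PySem.List.mem_pyRange_one] at hk
      have hsucc := pvFgB_pred arr d k m (by omega) (by omega)
      by_cases h1 : pvFgB arr d m k = -1
      · rw [if_pos h1] at hsucc
        by_cases h2 : pvV arr k < pvV arr m ∧ k - m ≤ d
        · rw [if_pos h2] at hsucc
          simp [pvQB, hsucc, pvPcB_eq arr d m k (by omega), h2, h1]
          omega
        · rw [if_neg h2] at hsucc
          simp [pvQB, hsucc, pvPcB_eq arr d m k (by omega), h2, h1]
          push_neg at h2
          rcases lt_or_ge (pvV arr k) (pvV arr m) with hv | hv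
          · exact Or.inr (by have := h2 hv; omega)
          · exact Or.inl hv
      · rw [if_neg h1] at hsucc
        simp [pvQB, hsucc, h1]
    · -- storage component
      rw [pvStoB, ← hn, pv_fold_set_map arr arr.length m _ (pvFgB arr d m)
        (by
          intro k hk
          rcases List.mem_filter.mp hk with ⟨hks, _⟩
          rcases (pvStkB_mem arr d m k).mp hks with ⟨h0, h1, _⟩
          rw [← hn]
          exact ⟨by omega, h1⟩)]
      rw [pvStoB, ← hn]
      apply List.map_congr_left
      intro k hk
      rw [PySem.List.mem_pyRange_one] at hk
      by_cases hK : k ∈ List.filter (pvPc arr d m) (pvStkB arr d m)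
      · rcases List.mem_filter.mp hK with ⟨hks, hpc⟩
        rcases (pvStkB_mem arr d m k).mp hks with ⟨h0, h1, hfg⟩
        rw [if_pos hK]
        rw [pvPcB_eq arr d m k h0, decide_eq_true_eq] at hpc
        rw [pvFgB_pred arr d k m h0 (by omega), if_pos hfg, if_pos hpc]
      · rw [if_neg hK]
        by_cases hkm : m < k
        · have hsucc := pvFgB_pred arr d k m hkm (by omega)
          by_cases h1 : pvFgB arr d m k = -1
          · have hnpc : ¬ (pvV arr k < pvV arr m ∧ k - m ≤ d) := by
              intro hc
              exact hK (List.mem_filter.mpr ⟨(pvStkB_mem arr d m k).mpr ⟨hkm, by omega, h1⟩,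
                by rw [pvPcB_eq arr d m k hkm]; exact decide_eq_true hc⟩)
            rw [if_pos h1, if_neg hnpc] at hsucc
            rw [hsucc, h1]
          · rw [if_neg h1] at hsucc
            exact hsucc.symm
        · rw [pvFgB_le arr d (m-1) k (by omega), pvFgB_le arr d m k (by omega)]

theorem pv_scanB (arr : List Int) (d k : Int) (h0 : 0 ≤ k) (hk : k < (arr.length:Int)) :
    pvFgB arr d (-1) k =
      pvFirstGreater arr k (PySem.List.pyRange (k-1) (max (k-d) 0 - 1) (-1)) := by
  set e := max (k-d) 0 - 1 with he
  rw [pvFirstGreater_eq_find?]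
  by_cases hcase : k - 1 ≤ e
  · rw [PySem.List.pyRange_neg_one_eq_nil hcase]
    simp only [List.find?_nil, Option.getD_none]
    rw [pvFgB_eq_neg_one_iff arr d (-1) k (by omega)]
    intro j hj1 hj2 hc
    omega
  · have he1 : -1 ≤ e := by omega
    have he2 : e ≤ k - 1 := by omega
    rw [pvFgB, pv_pyRange_neg_one_append (k-1) e (-1) he1 he2, List.find?_append]
    have hsecond : (PySem.List.pyRange e (-1) (-1)).find?
        (fun j => decide (pvV arr k < pvV arr j ∧ k - j ≤ d)) = none := by
      rw [List.find?_eq_none]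
      intro j hj
      rw [PySem.List.mem_pyRange_neg_one] at hj
      simp only [decide_eq_true_eq, not_and]
      intro _
      omega
    rw [hsecond, Option.or_none]
    have hfirst := pv_find?_congr (fun j => decide (pvV arr k < pvV arr j ∧ k - j ≤ d))
      (fun j => decide (pvV arr k < pvV arr j)) (PySem.List.pyRange (k-1) e (-1)) (by
        intro j hj
        rw [PySem.List.mem_pyRange_neg_one] at hj
        have hd : k - j ≤ d := by omega
        simp [hd])
    rw [hfirst]

theorem pv_backward_eq (arr : List Int) (d : Int) :
    pvBuild arr d (PySem.List.pyRange ((arr.length : Int)-1) (-1) (-1)) (List.replicate arr.length (-1)) =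
      (PySem.List.pyRange 0 (arr.length : Int) 1).map
        (fun i => pvFirstGreater arr i (PySem.List.pyRange (i-1) (max (i-d) 0 - 1) (-1))) := by
  have hinv := pv_buildB_inv arr d arr.length (le_refl _)
  rw [show (arr.length:Int) - 1 - ((arr.length:Nat):Int) = -1 by push_cast; ring] at hinv
  rw [pvBuild, hinv]
  apply List.map_congr_left
  intro k hk
  rw [PySem.List.mem_pyRange_one] at hk
  exact pv_scanB arr d k (by omega) (by omega)

-- ===== VERDICT (by name: the statement is the Claim_ definition above) =====
theorem solve_spec : Claim_equal_solve := by
  intro arr d _ _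
  unfold Spec_solve solve solve_alt
  simp only [pv_forward_eq arr d, pv_backward_eq arr d]
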